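-- pv_equiv track=rewrite | github.com/rohit2503/dsa | stack/nearest_larger_to_left.py | nearest_larger_number_to_left
-- ===== SOURCE A (Python) =====
-- from collections import deque
--
-- def nearest_larger_number_to_left(arr):
--     """
--     This function finds the nearest larger number to the left for each element in the array.
--     """
--     stack_list = deque([])
--     result = [-1] * len(arr)
--     for i in range(len(arr)):
--         while stack_list and stack_list[-1] <= arr[i]:
--             stack_list.pop()
--         if stack_list:
--             result[i] = stack_list[-1]
--         stack_list.append(arr[i])  # Add the current element to the stack
--     return result
-- ===== SOURCE B (Python) =====
-- def nearest_larger_number_to_left(arr):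
--     """
--     This function finds the nearest larger number to the left for each element in the array.
--     """
--     return [next((x for x in reversed(arr[:i]) if x > v), -1)
--             for i, v in enumerate(arr)]
-- ===== Notes on version B (the rewrite author's own statement) =====
-- stated objective: simpler
-- what changed: Replaced the stateful monotonic-stack loop with a stateless list comprehension: for each position take the first strictly larger element of the reversed prefix (via next/reversed/slice), defaulting to -1.
import Mathlib
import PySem

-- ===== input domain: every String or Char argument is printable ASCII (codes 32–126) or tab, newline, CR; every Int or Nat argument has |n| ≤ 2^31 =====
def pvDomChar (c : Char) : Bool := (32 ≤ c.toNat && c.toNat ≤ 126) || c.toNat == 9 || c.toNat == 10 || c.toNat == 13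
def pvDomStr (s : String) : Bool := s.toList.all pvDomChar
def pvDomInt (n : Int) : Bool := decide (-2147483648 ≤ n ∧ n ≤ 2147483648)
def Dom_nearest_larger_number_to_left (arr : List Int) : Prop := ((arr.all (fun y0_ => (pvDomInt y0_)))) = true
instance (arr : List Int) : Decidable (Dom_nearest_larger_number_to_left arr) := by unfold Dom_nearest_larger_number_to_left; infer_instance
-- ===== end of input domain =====

-- B replaces A's stateful monotonic stack with a stateless per-index comprehension over the reversed prefix (simpler).


-- ===== PORT A =====
-- the 'while stack_list and stack_list[-1] <= arr[i]: stack_list.pop()' loop (stack top at head)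
def popLE (s : List Int) (a : Int) : List Int :=
  match s with
  | [] => []
  | t :: rest => if t ≤ a then popLE rest a else t :: rest

-- the 'for i in range(len(arr))' loop; result[i] is written in index order, so emitted in order
def aLoop (xs : List Int) (stack : List Int) : List Int :=
  match xs with
  | [] => []
  | a :: rest =>
    let s' := popLE stack a
    (match s' with | [] => -1 | t :: _ => t) :: aLoop rest (a :: s')

def nearest_larger_number_to_left (arr : List Int) : List Int := aLoop arr []

-- ===== PORT B =====
-- the list comprehension: for each (i, v) in enumerate(arr),
-- next((x for x in reversed(arr[:i]) if x > v), -1)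
def nearest_larger_number_to_left_alt (arr : List Int) : List Int :=
  (PySem.List.enumerate arr).map (fun iv =>
    (((PySem.List.slice arr none (some iv.1)).reverse).find? (fun x => decide (x > iv.2))).getD (-1))

-- ===== PRECONDITION & SPEC =====
def Spec_nearest_larger_number_to_left (arr : List Int) (out : List Int) : Prop := out = nearest_larger_number_to_left_alt arr
instance (arr : List Int) (out : List Int) : Decidable (Spec_nearest_larger_number_to_left arr out) := by unfold Spec_nearest_larger_number_to_left; infer_instance

-- ===== CLAIM (what is proved, stated in full; the proofs are below) =====
def Claim_equal_nearest_larger_number_to_left : Prop := ∀ (arr : List Int), Dom_nearest_larger_number_to_left arr → Spec_nearest_larger_number_to_left arr (nearest_larger_number_to_left arr)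

-- ===== LEMMAS AND PROOFS =====
-- B's per-index value, abstracted over the reversed prefix rp
def nllF (rp : List Int) (v : Int) : Int :=
  (rp.find? (fun x => decide (x > v))).getD (-1)

-- A's per-index value: top of the stack after popping elements ≤ v, or -1
def topAfter (s : List Int) (v : Int) : Int :=
  match popLE s v with
  | [] => -1
  | t :: _ => t

theorem popLE_popLE (s : List Int) (a v : Int) (h : a ≤ v) :
    popLE (popLE s a) v = popLE s v := by
  induction s with
  | nil => simp [popLE]
  | cons x rest ih =>
    by_cases hx : x ≤ a
    · simp only [popLE, if_pos hx, if_pos (le_trans hx h)]; exact ih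
    · simp [popLE, hx]

-- the invariant relating the reversed prefix to A's stack
def NllInv (rp s : List Int) : Prop := ∀ v, nllF rp v = topAfter s v

theorem Inv_nil : NllInv [] [] := by intro v; simp [nllF, topAfter, popLE]

theorem Inv_step (rp s : List Int) (a : Int) (h : NllInv rp s) :
    NllInv (a :: rp) (a :: popLE s a) := by
  intro v
  by_cases hv : a ≤ v
  · have h1 : nllF (a :: rp) v = nllF rp v := by
      simp [nllF, List.find?, decide_eq_false (not_lt.mpr hv)]
    have h2 : topAfter (a :: popLE s a) v = topAfter s v := by
      simp only [topAfter, popLE, if_pos hv, popLE_popLE s a v hv]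
    rw [h1, h2]; exact h v
  · have hgt : a > v := lt_of_not_ge hv
    simp [nllF, topAfter, popLE, List.find?, hv, hgt]

theorem main_lemma (xs : List Int) : ∀ rp s, NllInv rp s →
    aLoop xs s = (PySem.List.enumerate xs (rp.length : Int)).map (fun iv =>
      nllF ((PySem.List.slice (rp.reverse ++ xs) none (some iv.1)).reverse) iv.2) := by
  induction xs with
  | nil => intro rp s _; simp [aLoop, PySem.List.enumerate_nil]
  | cons a rest ih =>
    intro rp s h
    rw [PySem.List.enumerate_cons, List.map_cons]
    simp only [aLoop]
    congr 1
    · rw [PySem.List.slice_to_natCast, List.take_left' (by simp), List.reverse_reverse]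
      exact (h a).symm
    · have harr : rp.reverse ++ a :: rest = (a :: rp).reverse ++ rest := by simp
      rw [harr]
      have h' := ih (a :: rp) (a :: popLE s a) (Inv_step rp s a h)
      push_cast at h'
      exact h'

-- ===== VERDICT (by name: the statement is the Claim_ definition above) =====
theorem nearest_larger_number_to_left_spec : Claim_equal_nearest_larger_number_to_left := by
  intro arr _
  unfold Spec_nearest_larger_number_to_left nearest_larger_number_to_left nearest_larger_number_to_left_alt
  have := main_lemma arr [] [] Inv_nil
  simpa [nllF] using this
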